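-- pv_equiv track=rewrite | github.com/caperren/Archives | OSU Coursework/CS 331 - Intro to Artificial Intelligence/Programming Assignment 3/sentiment_analyzer.py | get_features_from_vocab_and_sentence
-- ===== SOURCE A (Python) =====
-- def get_features_from_vocab_and_sentence(vocab_info, sentence_and_class):
--     vocab_list, vocab_indexer = vocab_info
--     sentence_words, sentence_class = sentence_and_class
--
--     features = [0 for _ in range(len(vocab_list))]
--     features.append(sentence_class)
--
--     for word in sentence_words:
--         if word in vocab_indexer:
--             features[vocab_indexer[word]] = 1
--
--     return features
-- ===== SOURCE B (Python) =====
-- def get_features_from_vocab_and_sentence(vocab_info, sentence_and_class):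
--     vocab_list, vocab_indexer = vocab_info
--     sentence_words, sentence_class = sentence_and_class
--     # run-length construction: sort the active indices, then emit the vector as
--     # zero-gaps between consecutive active indices, with no per-position test
--     active = sorted({vocab_indexer[w] for w in sentence_words if w in vocab_indexer})
--     features = []
--     prev = 0
--     for idx in active:
--         features.extend([0] * (idx - prev))
--         features.append(1)
--         prev = idx + 1
--     features.extend([0] * (len(vocab_list) - prev))
--     features.append(sentence_class)
--     return features
-- ===== Notes on version B (the rewrite author's own statement) =====
-- stated objective: alternative
-- what changed: B replaces A's sentence-driven write loop into a mutated zero vector by a run-length construction: it sorts the distinct active indexer values and emits the feature vector as zero-gaps between consecutive active indices, so no per-position membership test or in-place write occurs.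
-- outside the precondition, e.g. on get_features_from_vocab_and_sentence((['a'], {'a': -1}), (['a'], 5)): A returns [0, 1], B returns [1, 0, 5]; on get_features_from_vocab_and_sentence((['a'], {'a': 1}), (['a'], 7)): A returns [0, 1], B returns [0, 1, 7]; on get_features_from_vocab_and_sentence((['a'], {'a': 3}), (['a'], 7)): A raises IndexError, B returns [0, 0, 0, 1, 7]
import Mathlib
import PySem

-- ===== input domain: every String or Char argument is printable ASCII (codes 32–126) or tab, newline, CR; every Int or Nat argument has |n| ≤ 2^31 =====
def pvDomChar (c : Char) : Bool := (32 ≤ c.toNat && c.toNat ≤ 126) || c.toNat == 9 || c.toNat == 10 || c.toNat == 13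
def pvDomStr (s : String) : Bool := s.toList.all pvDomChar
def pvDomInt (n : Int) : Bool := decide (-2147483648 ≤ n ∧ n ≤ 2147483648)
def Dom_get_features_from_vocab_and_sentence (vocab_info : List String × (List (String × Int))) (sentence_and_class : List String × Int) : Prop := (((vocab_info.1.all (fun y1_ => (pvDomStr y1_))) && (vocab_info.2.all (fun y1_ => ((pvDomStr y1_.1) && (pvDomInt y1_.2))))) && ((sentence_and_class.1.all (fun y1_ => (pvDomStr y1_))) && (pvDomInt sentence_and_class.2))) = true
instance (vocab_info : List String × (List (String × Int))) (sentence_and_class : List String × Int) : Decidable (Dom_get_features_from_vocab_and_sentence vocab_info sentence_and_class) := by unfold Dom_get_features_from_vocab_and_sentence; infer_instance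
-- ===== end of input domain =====

-- B replaces A's sentence-driven write loop into a mutated zero vector by a run-length
-- construction: sort the distinct active indexer values and emit the vector as zero-gaps
-- between consecutive active indices (objective: alternative). Equivalence is claimed on
-- indexers whose used indices lie in [0, len(vocab_list)); see Pre_ below.

-- ===== PORT A =====
def get_features_from_vocab_and_sentence (vocab_info : List String × (List (String × Int))) (sentence_and_class : List String × Int) : List Int :=
  let vocab_list := vocab_info.1
  let vocab_indexer := PySem.Dict.mk vocab_info.2
  let sentence_words := sentence_and_class.1
  let sentence_class := sentence_and_class.2
  let features := (List.range vocab_list.length).map (fun _ => (0 : Int)) ++ [sentence_class]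
  sentence_words.foldl (fun fs word =>
    match vocab_indexer.get? word with
    | some idx => PySem.List.pySetD fs idx 1   -- total form: in range under Pre_ below
    | none => fs) features

-- ===== PORT B =====
def get_features_from_vocab_and_sentence_alt (vocab_info : List String × (List (String × Int))) (sentence_and_class : List String × Int) : List Int :=
  let vocab_list := vocab_info.1
  let vocab_indexer := PySem.Dict.mk vocab_info.2
  let sentence_words := sentence_and_class.1
  let sentence_class := sentence_and_class.2
  let active := PySem.List.sorted
    (PySem.Set.ofList (sentence_words.filterMap (fun w => vocab_indexer.get? w)))
    (fun x => x) false
  let st := active.foldl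
    (fun (st : List Int × Int) idx =>
      (st.1 ++ List.replicate (idx - st.2).toNat 0 ++ [1], idx + 1))
    ([], 0)
  st.1 ++ List.replicate ((vocab_list.length : Int) - st.2).toNat 0 ++ [sentence_class]

-- ===== PRECONDITION & SPEC =====
-- Pre_ restricts to the natural domain: every indexer entry looked up by the sentence maps into
-- [0, len(vocab_list)).  Outside it A raises IndexError (index beyond the list) or returns an
-- artefact of Python indexing (negative-index wraparound, or index == len overwriting the
-- appended class slot), while B returns the clean run-length vector.
def Pre_get_features_from_vocab_and_sentence (vocab_info : List String × (List (String × Int))) (sentence_and_class : List String × Int) : Prop :=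
  ∀ idx ∈ sentence_and_class.1.filterMap (fun w => (PySem.Dict.mk vocab_info.2).get? w),
    0 ≤ idx ∧ idx < (vocab_info.1.length : Int)
instance (vocab_info : List String × (List (String × Int))) (sentence_and_class : List String × Int) : Decidable (Pre_get_features_from_vocab_and_sentence vocab_info sentence_and_class) := by unfold Pre_get_features_from_vocab_and_sentence; infer_instance

def pvWitness_get_features_from_vocab_and_sentence : (List String × (List (String × Int))) × (List String × Int) :=
  ((["a", "b"], [("a", 0), ("b", 1)]), (["b", "c"], 1))

def Spec_get_features_from_vocab_and_sentence (vocab_info : List String × (List (String × Int))) (sentence_and_class : List String × Int) (out : List Int) : Prop := out = get_features_from_vocab_and_sentence_alt vocab_info sentence_and_class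
instance (vocab_info : List String × (List (String × Int))) (sentence_and_class : List String × Int) (out : List Int) : Decidable (Spec_get_features_from_vocab_and_sentence vocab_info sentence_and_class out) := by unfold Spec_get_features_from_vocab_and_sentence; infer_instance

-- ===== CLAIM (what is proved, stated in full; the proofs are below) =====
def Claim_equal_get_features_from_vocab_and_sentence : Prop := ∀ (vocab_info : List String × (List (String × Int))) (sentence_and_class : List String × Int), Dom_get_features_from_vocab_and_sentence vocab_info sentence_and_class → Pre_get_features_from_vocab_and_sentence vocab_info sentence_and_class → Spec_get_features_from_vocab_and_sentence vocab_info sentence_and_class (get_features_from_vocab_and_sentence vocab_info sentence_and_class)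

-- ===== LEMMAS AND PROOFS =====

-- A's write loop, pointwise: position i of the final list is 1 if i is an active index, else untouched.
theorem pv_loop_getElem? (d : PySem.Dict String Int) (ws : List String) (fs : List Int)
    (h : ∀ idx ∈ ws.filterMap (fun w => d.get? w), 0 ≤ idx ∧ idx < (fs.length : Int)) (i : Nat) :
    (ws.foldl (fun fs word =>
      match d.get? word with
      | some idx => PySem.List.pySetD fs idx 1
      | none => fs) fs)[i]? =
    if (i : Int) ∈ ws.filterMap (fun w => d.get? w) then some 1 else fs[i]? := by
  induction ws generalizing fs with
  | nil => simp
  | cons w ws ih =>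
    simp only [List.foldl_cons]
    cases hw : d.get? w with
    | none =>
      rw [ih fs (by intro idx hidx; exact h idx (by simp [hw, hidx]))]
      simp [hw]
    | some idx =>
      have hb := h idx (by simp [hw])
      rw [ih (PySem.List.pySetD fs idx 1) (by
            intro j hj
            have := h j (by simp only [List.filterMap_cons, hw]; exact List.mem_cons_of_mem _ hj)
            simpa [PySem.List.length_pySetD] using this)]
      rw [PySem.List.pySetD_of_nonneg _ _ hb.1]
      simp only [List.filterMap_cons, hw, List.mem_cons]
      by_cases hm : (i : Int) ∈ ws.filterMap (fun w => d.get? w)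
      · rw [if_pos hm, if_pos (Or.inr hm)]
      · have hlt : idx.toNat < fs.length := by omega
        rw [if_neg hm, List.getElem?_set]
        by_cases he : (i : Int) = idx
        · have hji : idx.toNat = i := by omega
          rw [if_pos hji, if_pos (hji ▸ hlt), if_pos (Or.inl he)]
        · have hne : idx.toNat ≠ i := by omega
          rw [if_neg hne, if_neg (by rintro (hx | hx); exact he hx; exact hm hx)]

-- B's gap-filling loop: over a strictly increasing list of indices in [p, n), the fold's output
-- padded with trailing zeros is the indicator segment for positions p, p+1, …, n-1.

theorem pv_gap_fold (p n : Int) (l : List Int) (hl : l.Pairwise (· < ·))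
    (hb : ∀ x ∈ l, p ≤ x ∧ x < n) (fs : List Int) :
    (l.foldl (fun (st : List Int × Int) idx =>
        (st.1 ++ List.replicate (idx - st.2).toNat 0 ++ [1], idx + 1)) (fs, p)).1 ++
      List.replicate (n - (l.foldl (fun (st : List Int × Int) idx =>
        (st.1 ++ List.replicate (idx - st.2).toNat 0 ++ [1], idx + 1)) (fs, p)).2).toNat 0 =
    fs ++ (List.range (n - p).toNat).map (fun (j : Nat) => if (p + (j : Int)) ∈ l then (1 : Int) else 0) := by
  induction l generalizing fs p with
  | nil =>
    simp only [List.foldl_nil, List.not_mem_nil, if_false]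
    rw [List.map_const', List.append_cancel_left_eq]
    simp
  | cons a l ih =>
    obtain ⟨ha1, ha2⟩ := hb a (List.mem_cons_self)
    have hgt : ∀ x ∈ l, a < x := fun x hx => (List.pairwise_cons.mp hl).1 x hx
    simp only [List.foldl_cons]
    rw [ih (a + 1) (List.pairwise_cons.mp hl).2
          (fun x hx => ⟨by have := hgt x hx; omega, (hb x (List.mem_cons_of_mem _ hx)).2⟩)]
    have hsplit : (n - p).toNat = ((a - p).toNat + 1) + (n - (a + 1)).toNat := by omega
    rw [hsplit, List.range_add, List.range_succ, List.map_append, List.map_append]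
    have e1 : (List.range (a - p).toNat).map (fun (j : Nat) => if p + (j : Int) ∈ a :: l then (1 : Int) else 0)
        = List.replicate (a - p).toNat 0 := by
      rw [show (List.replicate (a - p).toNat (0 : Int)) =
            (List.range (a - p).toNat).map (fun _ => (0 : Int)) by
            rw [List.map_const']; simp]
      apply List.map_congr_left
      intro j hj
      have hjk : j < (a - p).toNat := List.mem_range.mp hj
      have h1 : ¬ (p + (j : Int) = a) := by omega
      have h2 : p + (j : Int) ∉ l := fun hm => by have := hgt _ hm; omega
      simp [h1, h2]
    have e2 : [((a - p).toNat : Nat)].map (fun (j : Nat) => if p + (j : Int) ∈ a :: l then (1 : Int) else 0)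
        = [(1 : Int)] := by
      have h : p + (((a - p).toNat : Nat) : Int) = a := by omega
      simp only [List.map_cons, List.map_nil, h]
      simp
    have e3 : ((List.range (n - (a + 1)).toNat).map (fun x => (a - p).toNat + 1 + x)).map
          (fun (j : Nat) => if p + (j : Int) ∈ a :: l then (1 : Int) else 0)
        = (List.range (n - (a + 1)).toNat).map (fun (j : Nat) => if a + 1 + (j : Int) ∈ l then (1 : Int) else 0) := by
      rw [List.map_map]
      apply List.map_congr_left
      intro j hj
      have hm : p + (((a - p).toNat + 1 + j : Nat) : Int) = a + 1 + (j : Int) := by push_cast; omega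
      have hne : ¬ (a + 1 + (j : Int) = a) := by omega
      simp only [Function.comp_apply, hm, List.mem_cons]
      simp [hne]
    rw [e1, e2, e3]
    simp [List.append_assoc]


theorem get_features_from_vocab_and_sentence_spec : Claim_equal_get_features_from_vocab_and_sentence := by
  intro vocab_info sentence_and_class _ hpre
  obtain ⟨vocab_list, m⟩ := vocab_info
  obtain ⟨ws, cls⟩ := sentence_and_class
  unfold Spec_get_features_from_vocab_and_sentence
  unfold get_features_from_vocab_and_sentence get_features_from_vocab_and_sentence_alt
  simp only []
  set d := PySem.Dict.mk m with hd
  set acts := ws.filterMap (fun w => d.get? w) with hacts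
  set n := vocab_list.length with hn
  have hb : ∀ idx ∈ acts, 0 ≤ idx ∧ idx < (n : Int) := hpre
  set active := PySem.List.sorted (PySem.Set.ofList acts) (fun x => x) false with hactive
  have hmemact : ∀ x : Int, x ∈ active ↔ x ∈ acts := by
    intro x
    rw [hactive, PySem.List.mem_sorted]
    simp [PySem.Set.mem_ofList]
  have hpw : active.Pairwise (· < ·) := PySem.List.sorted_ofList_pairwise_lt acts
  have hba : ∀ x ∈ active, (0 : Int) ≤ x ∧ x < (n : Int) := by
    intro x hx; exact hb x ((hmemact x).mp hx)
  have hB := pv_gap_fold 0 (n : Int) active hpw hba []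
  rw [List.append_assoc]
  rw [show List.replicate ((n : Int) -
        (active.foldl (fun (st : List Int × Int) idx =>
          (st.1 ++ List.replicate (idx - st.2).toNat 0 ++ [1], idx + 1)) ([], 0)).2).toNat (0:Int) ++ [cls]
      = (List.replicate ((n : Int) -
        (active.foldl (fun (st : List Int × Int) idx =>
          (st.1 ++ List.replicate (idx - st.2).toNat 0 ++ [1], idx + 1)) ([], 0)).2).toNat (0:Int)) ++ [cls] from rfl]
  rw [← List.append_assoc, hB]
  simp only [Int.sub_zero, Int.toNat_natCast, List.nil_append]
  apply List.ext_getElem?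
  intro i
  rw [pv_loop_getElem? d ws _ (by
        intro idx hidx
        have hx := hb idx hidx
        have hlen : ((List.range n).map (fun _ => (0 : Int)) ++ [cls]).length = n + 1 := by simp
        rw [hlen]
        push_cast
        omega) i]
  rcases Nat.lt_trichotomy i n with hi | hi | hi
  · -- i < n : indicator position
    rw [List.getElem?_append_left (by simpa using hi),
        List.getElem?_append_left (by simpa using hi),
        List.getElem?_map, List.getElem?_map, List.getElem?_range hi]
    have hz : (0 : Int) + (i : Int) = (i : Int) := by omega
    by_cases hm : (i : Int) ∈ acts
    · rw [if_pos hm]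
      simp only [Option.map_some, hz]
      rw [if_pos ((hmemact _).mpr hm)]
    · rw [if_neg hm]
      simp only [Option.map_some, hz]
      rw [if_neg (fun hc => hm ((hmemact _).mp hc))]
  · -- i = n : the class slot
    have hni : (i : Int) ∉ acts := fun hc => by have := hb _ hc; omega
    rw [if_neg hni,
        List.getElem?_append_right (by simp [hi]),
        List.getElem?_append_right (by simp [hi])]
    simp [hi]
  · -- i > n : past the end on both sides
    have hni : (i : Int) ∉ acts := fun hc => by have := hb _ hc; omega
    rw [if_neg hni,
        List.getElem?_eq_none (by simp; omega),
        List.getElem?_eq_none (by simp; omega)]
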